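-- pv_equiv track=rewrite | github.com/eliottcassidy2000/math | 04-computation/h21_cobipartite_verify.py | is_cobipartite
-- ===== SOURCE A (Python) =====
-- def is_cobipartite(n, edges):
--     """Check if graph is co-bipartite (union of 2 cliques)."""
--     edge_set = set(edges)
--     # Try all 2-partitions
--     for mask in range(1 << n):
--         clique_A = [v for v in range(n) if mask & (1 << v)]
--         clique_B = [v for v in range(n) if not (mask & (1 << v))]
--         # Check both are cliques in G
--         is_valid = True
--         for group in [clique_A, clique_B]:
--             for i in range(len(group)):
--                 for j in range(i+1, len(group)):
--                     if (group[i], group[j]) not in edge_set and (group[j], group[i]) not in edge_set: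
--                         is_valid = False
--                         break
--                 if not is_valid:
--                     break
--         if is_valid:
--             return True
--     return False
-- ===== SOURCE B (Python) =====
-- def is_cobipartite(n, edges):
--     """Check if graph is co-bipartite (union of 2 cliques) by backtracking:
--     place each vertex into one of two cliques, pruning as soon as a vertex
--     is not adjacent to every current member of the clique it is placed in."""
--     edge_set = set(edges)
--
--     def ok(v, group):
--         return all((v, w) in edge_set or (w, v) in edge_set for w in group)
--
--     def place(v, clique_A, clique_B):
--         if v >= n:
--             return True
--         if ok(v, clique_A) and place(v + 1, clique_A + [v], clique_B):
--             return True
--         return ok(v, clique_B) and place(v + 1, clique_A, clique_B + [v])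
--
--     return place(0, [], [])
-- ===== Notes on version B (the rewrite author's own statement) =====
-- stated objective: alternative
-- what changed: A enumerates all 2^n bipartition masks and re-checks both parts from scratch for each; B backtracks over vertices, placing each into one of two candidate cliques and pruning a branch as soon as a vertex is not adjacent to every current member of its clique.
import Mathlib
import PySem

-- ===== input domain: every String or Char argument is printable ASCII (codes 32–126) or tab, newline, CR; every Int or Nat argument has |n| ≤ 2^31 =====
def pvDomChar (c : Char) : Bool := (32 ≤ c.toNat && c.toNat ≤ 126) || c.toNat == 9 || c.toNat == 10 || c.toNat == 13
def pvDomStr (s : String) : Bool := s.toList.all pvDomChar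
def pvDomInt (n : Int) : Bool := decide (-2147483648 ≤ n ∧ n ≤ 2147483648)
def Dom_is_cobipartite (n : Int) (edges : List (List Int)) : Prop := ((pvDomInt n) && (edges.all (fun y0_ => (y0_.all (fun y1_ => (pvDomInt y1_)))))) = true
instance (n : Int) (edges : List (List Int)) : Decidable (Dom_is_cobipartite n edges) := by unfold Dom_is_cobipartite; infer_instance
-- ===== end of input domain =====

-- B replaces A's exhaustive scan of all 2^n bipartition masks by backtracking: vertices are placed
-- one by one into one of the two candidate cliques, a branch being pruned as soon as a vertex is not
-- adjacent to every current member of its clique (alternative algorithm; prunes instead of enumerating).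

-- ===== PORT A =====
-- '(x, y) not in edge_set and (y, x) not in edge_set': the sequences in edges are ported as
-- List Int, so the probed pair is the 2-element list [x, y] (exact: sequence equality is elementwise).
def pvMissing (es : PySem.Set (List Int)) (x y : Int) : Bool :=
  !(PySem.Set.contains es [x, y]) && !(PySem.Set.contains es [y, x])

-- inner 'for j in range(i+1, len(group))'; 'break' after 'is_valid = False' = returning false
def pvJLoop (es : PySem.Set (List Int)) (g : List Int) (i : Int) (valid : Bool) :
    List Int → Bool
  | [] => valid
  | j :: js =>
    if pvMissing es (PySem.List.pyGetD g i 0) (PySem.List.pyGetD g j 0) then false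
    else pvJLoop es g i valid js

-- 'for i in range(len(group))' with the trailing 'if not is_valid: break'
def pvILoop (es : PySem.Set (List Int)) (g : List Int) (valid : Bool) :
    List Int → Bool
  | [] => valid
  | i :: is_ =>
    let v := pvJLoop es g i valid (PySem.List.pyRange (i + 1) (PySem.List.len g) 1)
    if !v then v else pvILoop es g v is_

-- one mask: build clique_A / clique_B, then 'for group in [clique_A, clique_B]' threading is_valid
def pvValidMask (es : PySem.Set (List Int)) (n : Int) (mask : Nat) : Bool :=
  let cliqueA := (PySem.List.pyRange 0 n 1).filter (fun v => PySem.Int.band (mask : Int) (1 <<< v.toNat) != 0)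
  let cliqueB := (PySem.List.pyRange 0 n 1).filter (fun v => !(PySem.Int.band (mask : Int) (1 <<< v.toNat) != 0))
  pvILoop es cliqueB (pvILoop es cliqueA true (PySem.List.pyRange 0 (PySem.List.len cliqueA) 1))
    (PySem.List.pyRange 0 (PySem.List.len cliqueB) 1)

-- 'for mask in range(1 << n)': early 'return True' on a valid mask, else continue
def pvMaskLoop (es : PySem.Set (List Int)) (n : Int) (mask : Nat) (fuel : Nat) : Bool :=
  match fuel with
  | 0 => false
  | fuel + 1 => if pvValidMask es n mask then true else pvMaskLoop es n (mask + 1) fuel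

def is_cobipartite (n : Int) (edges : List (List Int)) : Bool :=
  let es := PySem.Set.ofList edges
  pvMaskLoop es n ((0 : Nat)) (1 <<< n.toNat)   -- range(1 << n); Pre_ gives 0 ≤ n

-- ===== PORT B =====
-- ok(v, group): v adjacent (in either stored order) to every member of group
def pvOk (es : PySem.Set (List Int)) (v : Int) (g : List Int) : Bool :=
  g.all (fun w => PySem.Set.contains es [v, w] || PySem.Set.contains es [w, v])

-- place(v, clique_A, clique_B); the Nat counter is (n - v).toNat, so 0 is exactly 'v >= n'
def pvPlace (es : PySem.Set (List Int)) : Nat → Int → List Int → List Int → Bool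
  | 0, _, _, _ => true
  | left + 1, v, ga, gb =>
    (pvOk es v ga && pvPlace es left (v + 1) (ga ++ [v]) gb) ||
    (pvOk es v gb && pvPlace es left (v + 1) ga (gb ++ [v]))

def is_cobipartite_alt (n : Int) (edges : List (List Int)) : Bool :=
  let es := PySem.Set.ofList edges
  pvPlace es n.toNat 0 [] []

-- ===== PRECONDITION & SPEC =====
-- Pre_ excludes exactly n < 0, where Python A raises ValueError ('1 << n' with negative shift count).
def Pre_is_cobipartite (n : Int) (edges : List (List Int)) : Prop := 0 ≤ n
instance (n : Int) (edges : List (List Int)) : Decidable (Pre_is_cobipartite n edges) := by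
  unfold Pre_is_cobipartite; infer_instance

def pvWitness_is_cobipartite : Int × List (List Int) := (3, [[0, 1], [1, 2], [0, 2]])

def Spec_is_cobipartite (n : Int) (edges : List (List Int)) (out : Bool) : Prop :=
  out = is_cobipartite_alt n edges
instance (n : Int) (edges : List (List Int)) (out : Bool) : Decidable (Spec_is_cobipartite n edges out) := by
  unfold Spec_is_cobipartite; infer_instance

-- ===== CLAIM (what is proved, stated in full; the proofs are below) =====
def Claim_equal_is_cobipartite : Prop := ∀ (n : Int) (edges : List (List Int)), Dom_is_cobipartite n edges → Pre_is_cobipartite n edges → Spec_is_cobipartite n edges (is_cobipartite n edges)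

-- ===== LEMMAS AND PROOFS =====

-- ===== proof helpers =====
def pvEdge (es : PySem.Set (List Int)) (a b : Int) : Bool :=
  PySem.Set.contains es [a, b] || PySem.Set.contains es [b, a]

theorem pvEdge_symm (es : PySem.Set (List Int)) (a b : Int) : pvEdge es a b = pvEdge es b a := by
  simp [pvEdge, Bool.or_comm]

theorem not_pvMissing (es : PySem.Set (List Int)) (x y : Int) :
    (!pvMissing es x y) = pvEdge es x y := by
  simp [pvMissing, pvEdge]

theorem pvJLoop_eq (es : PySem.Set (List Int)) (g : List Int) (i : Int) (valid : Bool)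
    (js : List Int) :
    pvJLoop es g i valid js =
      (valid && js.all (fun j => pvEdge es (PySem.List.pyGetD g i 0) (PySem.List.pyGetD g j 0))) := by
  induction js with
  | nil => simp [pvJLoop]
  | cons j js ih =>
    simp only [pvJLoop, List.all_cons]
    cases h : pvMissing es (PySem.List.pyGetD g i 0) (PySem.List.pyGetD g j 0) <;>
      simp [← not_pvMissing, h, ih]

theorem pvILoop_eq (es : PySem.Set (List Int)) (g : List Int) (valid : Bool) (l : List Int) :
    pvILoop es g valid l =
      (valid && l.all (fun i => (PySem.List.pyRange (i + 1) (PySem.List.len g) 1).all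
          (fun j => pvEdge es (PySem.List.pyGetD g i 0) (PySem.List.pyGetD g j 0)))) := by
  induction l generalizing valid with
  | nil => simp [pvILoop]
  | cons i l ih =>
    simp only [pvILoop, pvJLoop_eq, List.all_cons]
    cases valid <;>
      cases h : (PySem.List.pyRange (i + 1) (PySem.List.len g) 1).all
          (fun j => pvEdge es (PySem.List.pyGetD g i 0) (PySem.List.pyGetD g j 0)) <;>
      simp_all

theorem pvMaskLoop_eq (es : PySem.Set (List Int)) (n : Int) (mask fuel : Nat) :
    pvMaskLoop es n mask fuel = true ↔ ∃ k < fuel, pvValidMask es n (mask + k) = true := by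
  induction fuel generalizing mask with
  | zero => simp [pvMaskLoop]
  | succ f ih =>
    simp only [pvMaskLoop]
    by_cases h : pvValidMask es n mask = true
    · simp only [h, if_true]
      constructor
      · intro _; exact ⟨0, Nat.succ_pos f, by simpa using h⟩
      · intro _; trivial
    · rw [if_neg (by simpa using h), ih]
      constructor
      · rintro ⟨k, hk, hv⟩
        exact ⟨k + 1, by omega, by rwa [show mask + (k + 1) = mask + 1 + k from by omega]⟩
      · rintro ⟨k, hk, hv⟩
        cases k with
        | zero => simp at hv; exact absurd hv h
        | succ k => exact ⟨k, by omega, by rwa [show mask + 1 + k = mask + (k + 1) from by omega]⟩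
theorem pvGetD_getElem (g : List Int) (i : Nat) (h : i < g.length) :
    PySem.List.pyGetD g (i : Int) 0 = g[i] := by
  simp [PySem.List.pyGetD_natCast, List.getD_eq_getElem?_getD, List.getElem?_eq_getElem h]

theorem pvGOk_iff (es : PySem.Set (List Int)) (g : List Int) :
    ((PySem.List.pyRange 0 (PySem.List.len g) 1).all fun i =>
      (PySem.List.pyRange (i + 1) (PySem.List.len g) 1).all fun j =>
        pvEdge es (PySem.List.pyGetD g i 0) (PySem.List.pyGetD g j 0)) = true
    ↔ g.Pairwise (fun a b => pvEdge es a b = true) := by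
  rw [List.pairwise_iff_getElem]
  simp only [List.all_eq_true, PySem.List.mem_pyRange_one, PySem.List.len_eq]
  constructor
  · intro h i j hi hj hij
    have := h (i : Int) ⟨by omega, by exact_mod_cast hi⟩ (j : Int) ⟨by omega, by exact_mod_cast hj⟩
    rwa [pvGetD_getElem g i hi, pvGetD_getElem g j hj] at this
  · intro h i hi j hj
    obtain ⟨i', rfl⟩ := Int.eq_ofNat_of_zero_le hi.1
    have hj0 : (0 : Int) ≤ j := by omega
    obtain ⟨j', rfl⟩ := Int.eq_ofNat_of_zero_le hj0
    have hi' : i' < g.length := by exact_mod_cast hi.2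
    have hj' : j' < g.length := by exact_mod_cast hj.2
    rw [pvGetD_getElem g i' hi', pvGetD_getElem g j' hj']
    exact h i' j' hi' hj' (by omega)
theorem pvBand_testBit (mask t : Nat) :
    (PySem.Int.band (mask : Int) (((1 <<< t : Nat)) : Int) != 0) = mask.testBit t := by
  rw [PySem.Int.band_natCast, Nat.one_shiftLeft, Nat.and_two_pow mask t]
  cases h : mask.testBit t <;> simp

-- the two partition classes of a mask, as testBit filters
def pvClassT (n : Int) (mask : Nat) : List Int :=
  (PySem.List.pyRange 0 n 1).filter (fun v => mask.testBit v.toNat)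
def pvClassF (n : Int) (mask : Nat) : List Int :=
  (PySem.List.pyRange 0 n 1).filter (fun v => !mask.testBit v.toNat)

theorem pvValidMask_iff (es : PySem.Set (List Int)) (n : Int) (mask : Nat) :
    pvValidMask es n mask = true ↔
      (pvClassT n mask).Pairwise (fun a b => pvEdge es a b = true) ∧
      (pvClassF n mask).Pairwise (fun a b => pvEdge es a b = true) := by
  have hT : (PySem.List.pyRange 0 n 1).filter
      (fun v => PySem.Int.band (mask : Int) (((1 <<< v.toNat : Nat)) : Int) != 0) = pvClassT n mask := by
    unfold pvClassT; congr 1; funext v; exact pvBand_testBit mask v.toNat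
  have hF : (PySem.List.pyRange 0 n 1).filter
      (fun v => !(PySem.Int.band (mask : Int) (((1 <<< v.toNat : Nat)) : Int) != 0)) = pvClassF n mask := by
    unfold pvClassF; congr 1; funext v; rw [pvBand_testBit mask v.toNat]
  have hdef0 : pvValidMask es n mask =
      pvILoop es
        ((PySem.List.pyRange 0 n 1).filter
          (fun v => !(PySem.Int.band (mask : Int) (((1 <<< v.toNat : Nat)) : Int) != 0)))
        (pvILoop es
          ((PySem.List.pyRange 0 n 1).filter
            (fun v => PySem.Int.band (mask : Int) (((1 <<< v.toNat : Nat)) : Int) != 0))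
          true
          (PySem.List.pyRange 0 (PySem.List.len ((PySem.List.pyRange 0 n 1).filter
            (fun v => PySem.Int.band (mask : Int) (((1 <<< v.toNat : Nat)) : Int) != 0))) 1))
        (PySem.List.pyRange 0 (PySem.List.len ((PySem.List.pyRange 0 n 1).filter
          (fun v => !(PySem.Int.band (mask : Int) (((1 <<< v.toNat : Nat)) : Int) != 0)))) 1) := rfl
  rw [hdef0, hT, hF, pvILoop_eq, pvILoop_eq]
  simp only [Bool.true_and, Bool.and_eq_true]
  rw [pvGOk_iff, pvGOk_iff]

theorem pvA_iff (n : Int) (edges : List (List Int)) :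
    is_cobipartite n edges = true ↔
      ∃ mask < 2 ^ n.toNat,
        (pvClassT n mask).Pairwise (fun a b => pvEdge (PySem.Set.ofList edges) a b = true) ∧
        (pvClassF n mask).Pairwise (fun a b => pvEdge (PySem.Set.ofList edges) a b = true) := by
  have hdef : is_cobipartite n edges =
      pvMaskLoop (PySem.Set.ofList edges) n 0 (1 <<< n.toNat) := rfl
  rw [hdef, pvMaskLoop_eq]
  rw [show (1 <<< n.toNat) = 2 ^ n.toNat from Nat.one_shiftLeft n.toNat]
  constructor
  · rintro ⟨k, hk, hv⟩
    exact ⟨k, hk, (pvValidMask_iff _ _ _).mp (by simpa using hv)⟩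
  · rintro ⟨mask, hm, h⟩
    exact ⟨mask, hm, by simpa using (pvValidMask_iff _ _ _).mpr h⟩
def pvPartA : Int → List Bool → List Int
  | _, [] => []
  | v, b :: bs => if b then v :: pvPartA (v + 1) bs else pvPartA (v + 1) bs
def pvPartB : Int → List Bool → List Int
  | _, [] => []
  | v, b :: bs => if b then pvPartB (v + 1) bs else v :: pvPartB (v + 1) bs

theorem pvOk_iff (es : PySem.Set (List Int)) (v : Int) (g : List Int) :
    pvOk es v g = true ↔ ∀ w ∈ g, pvEdge es v w = true := by
  simp [pvOk, pvEdge, List.all_eq_true]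

theorem pvSnoc_pairwise {es : PySem.Set (List Int)} {g : List Int} {v : Int}
    (hg : g.Pairwise (fun a b => pvEdge es a b = true)) (hok : pvOk es v g = true) :
    (g ++ [v]).Pairwise (fun a b => pvEdge es a b = true) := by
  rw [List.pairwise_append]
  refine ⟨hg, List.pairwise_singleton _ _, ?_⟩
  intro a ha b hb
  rw [List.mem_singleton] at hb
  rw [hb, pvEdge_symm]
  exact (pvOk_iff es v g).mp hok a ha

theorem pvCross_ok {es : PySem.Set (List Int)} {g t : List Int} {v : Int}
    (h : (g ++ v :: t).Pairwise (fun a b => pvEdge es a b = true)) : pvOk es v g = true := by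
  rw [List.pairwise_append] at h
  rw [pvOk_iff]
  intro w hw
  rw [pvEdge_symm]
  exact h.2.2 w hw v (List.mem_cons_self)

theorem pvPlace_iff (es : PySem.Set (List Int)) (left : Nat) :
    ∀ (v : Int) (ga gb : List Int),
      ga.Pairwise (fun a b => pvEdge es a b = true) →
      gb.Pairwise (fun a b => pvEdge es a b = true) →
      (pvPlace es left v ga gb = true ↔
        ∃ bs : List Bool, bs.length = left ∧
          (ga ++ pvPartA v bs).Pairwise (fun a b => pvEdge es a b = true) ∧
          (gb ++ pvPartB v bs).Pairwise (fun a b => pvEdge es a b = true)) := by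
  induction left with
  | zero =>
    intro v ga gb hga hgb
    simp only [pvPlace, true_iff]
    exact ⟨[], rfl, by simpa [pvPartA], by simpa [pvPartB]⟩
  | succ left ih =>
    intro v ga gb hga hgb
    simp only [pvPlace, Bool.or_eq_true, Bool.and_eq_true]
    constructor
    · rintro (⟨hok, hrec⟩ | ⟨hok, hrec⟩)
      · obtain ⟨bs, hl, hA, hB⟩ := (ih (v + 1) (ga ++ [v]) gb (pvSnoc_pairwise hga hok) hgb).mp hrec
        exact ⟨true :: bs, by simp [hl], by simpa [pvPartA, List.append_assoc] using hA, by simpa [pvPartB] using hB⟩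
      · obtain ⟨bs, hl, hA, hB⟩ := (ih (v + 1) ga (gb ++ [v]) hga (pvSnoc_pairwise hgb hok)).mp hrec
        exact ⟨false :: bs, by simp [hl], by simpa [pvPartA] using hA, by simpa [pvPartB, List.append_assoc] using hB⟩
    · rintro ⟨bs, hl, hA, hB⟩
      match bs, hl with
      | true :: bs, hl =>
        simp only [pvPartA, if_true, pvPartB] at hA hB
        have hok : pvOk es v ga = true := pvCross_ok hA
        left
        refine ⟨hok, (ih (v + 1) (ga ++ [v]) gb (pvSnoc_pairwise hga hok) hgb).mpr
          ⟨bs, by simp at hl; omega, ?_, hB⟩⟩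
        rwa [List.append_assoc]
      | false :: bs, hl =>
        simp only [pvPartA, pvPartB, Bool.false_eq_true, if_false] at hA hB
        have hok : pvOk es v gb = true := pvCross_ok hB
        right
        refine ⟨hok, (ih (v + 1) ga (gb ++ [v]) hga (pvSnoc_pairwise hgb hok)).mpr
          ⟨bs, by simp at hl; omega, hA, ?_⟩⟩
        rwa [List.append_assoc]

theorem pvB_iff (n : Int) (edges : List (List Int)) :
    is_cobipartite_alt n edges = true ↔
      ∃ bs : List Bool, bs.length = n.toNat ∧
        (pvPartA 0 bs).Pairwise (fun a b => pvEdge (PySem.Set.ofList edges) a b = true) ∧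
        (pvPartB 0 bs).Pairwise (fun a b => pvEdge (PySem.Set.ofList edges) a b = true) := by
  have hdef : is_cobipartite_alt n edges =
      pvPlace (PySem.Set.ofList edges) n.toNat 0 [] [] := rfl
  rw [hdef, pvPlace_iff _ _ 0 [] [] (List.Pairwise.nil) (List.Pairwise.nil)]
  simp
def pvOfBits : List Bool → Nat
  | [] => 0
  | b :: bs => (cond b 1 0) + 2 * pvOfBits bs

theorem pvOfBits_lt (bs : List Bool) : pvOfBits bs < 2 ^ bs.length := by
  induction bs with
  | nil => simp [pvOfBits]
  | cons b bs ih => cases b <;> simp [pvOfBits, pow_succ] <;> omega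

theorem pvTestBit_ofBits (bs : List Bool) : ∀ i, (pvOfBits bs).testBit i = bs.getD i false := by
  induction bs with
  | nil => intro i; simp [pvOfBits]
  | cons b bs ih =>
    intro i
    cases i with
    | zero =>
      rw [Nat.testBit_zero]
      cases b <;> simp [pvOfBits]
    | succ i =>
      rw [Nat.testBit_succ]
      simp only [pvOfBits]
      rw [show ((cond b 1 0) + 2 * pvOfBits bs) / 2 = pvOfBits bs from by cases b <;> simp; omega]
      simpa using ih i

theorem pvPartA_filter (mask : Nat) : ∀ (m v : Nat),
    pvPartA (v : Int) ((List.range m).map (fun i => mask.testBit (v + i))) =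
      (PySem.List.pyRange (v : Int) ((v + m : Nat) : Int) 1).filter (fun x => mask.testBit x.toNat) := by
  intro m
  induction m with
  | zero =>
    intro v
    rw [PySem.List.pyRange_one_eq_nil (by omega : ((v + 0 : Nat) : Int) ≤ ((v : Nat) : Int))]
    simp [pvPartA]
  | succ m ih =>
    intro v
    rw [show v + (m + 1) = (v + 1) + m from by omega]
    rw [List.range_succ_eq_map]
    simp only [List.map_cons, List.map_map]
    have hc : ((List.range m).map ((fun i => mask.testBit (v + i)) ∘ Nat.succ)) =
        ((List.range m).map (fun i => mask.testBit ((v + 1) + i))) := by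
      apply List.map_congr_left; intro i _; simp [Function.comp]; ring_nf
    rw [hc]
    conv_rhs => rw [PySem.List.pyRange_one_cons (by push_cast; omega), List.filter_cons]
    simp only [pvPartA]
    have hv1 : ((v : Nat) : Int) + 1 = ((v + 1 : Nat) : Int) := by push_cast; ring
    rw [hv1, ih (v + 1)]
    rw [Nat.add_zero, show ((v : Nat) : Int).toNat = v from by omega]

theorem pvPartB_filter (mask : Nat) : ∀ (m v : Nat),
    pvPartB (v : Int) ((List.range m).map (fun i => mask.testBit (v + i))) =
      (PySem.List.pyRange (v : Int) ((v + m : Nat) : Int) 1).filter (fun x => !mask.testBit x.toNat) := by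
  intro m
  induction m with
  | zero =>
    intro v
    rw [PySem.List.pyRange_one_eq_nil (by omega : ((v + 0 : Nat) : Int) ≤ ((v : Nat) : Int))]
    simp [pvPartB]
  | succ m ih =>
    intro v
    rw [show v + (m + 1) = (v + 1) + m from by omega]
    rw [List.range_succ_eq_map]
    simp only [List.map_cons, List.map_map]
    have hc : ((List.range m).map ((fun i => mask.testBit (v + i)) ∘ Nat.succ)) =
        ((List.range m).map (fun i => mask.testBit ((v + 1) + i))) := by
      apply List.map_congr_left; intro i _; simp [Function.comp]; ring_nf
    rw [hc]
    conv_rhs => rw [PySem.List.pyRange_one_cons (by push_cast; omega), List.filter_cons]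
    simp only [pvPartB]
    have hv1 : ((v : Nat) : Int) + 1 = ((v + 1 : Nat) : Int) := by push_cast; ring
    rw [hv1, ih (v + 1)]
    have ht : ((v : Nat) : Int).toNat = v := by omega
    simp only [ht, Nat.add_zero]
    cases h : mask.testBit v <;> simp
theorem pvBits_of_ofBits (bs : List Bool) :
    ((List.range bs.length).map (fun i => (pvOfBits bs).testBit (0 + i))) = bs := by
  apply List.ext_getElem (by simp)
  intro i h1 h2
  simp only [List.getElem_map, List.getElem_range, Nat.zero_add, pvTestBit_ofBits]
  simp [List.getD_eq_getElem?_getD, List.getElem?_eq_getElem h2]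

theorem pvMain (n : Int) (edges : List (List Int)) (hn : 0 ≤ n) :
    is_cobipartite n edges = is_cobipartite_alt n edges := by
  have hcast : ((n.toNat : Nat) : Int) = n := Int.toNat_of_nonneg hn
  apply Bool.coe_iff_coe.mp
  rw [pvA_iff, pvB_iff]
  constructor
  · rintro ⟨mask, hm, hT, hF⟩
    refine ⟨(List.range n.toNat).map (fun i => mask.testBit (0 + i)), by simp, ?_, ?_⟩
    · rw [show (0 : Int) = ((0 : Nat) : Int) from rfl, pvPartA_filter mask n.toNat 0]
      unfold pvClassT at hT
      simpa [Nat.zero_add, hcast] using hT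
    · rw [show (0 : Int) = ((0 : Nat) : Int) from rfl, pvPartB_filter mask n.toNat 0]
      unfold pvClassF at hF
      simpa [Nat.zero_add, hcast] using hF
  · rintro ⟨bs, hl, hA, hB⟩
    refine ⟨pvOfBits bs, by rw [← hl]; exact pvOfBits_lt bs, ?_, ?_⟩
    · unfold pvClassT
      have := pvPartA_filter (pvOfBits bs) bs.length 0
      rw [pvBits_of_ofBits] at this
      simp only [Nat.cast_zero, Nat.zero_add] at this
      rw [this] at hA
      simpa [hl, hcast] using hA
    · unfold pvClassF
      have := pvPartB_filter (pvOfBits bs) bs.length 0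
      rw [pvBits_of_ofBits] at this
      simp only [Nat.cast_zero, Nat.zero_add] at this
      rw [this] at hB
      simpa [hl, hcast] using hB

-- ===== VERDICT (by name: the statement is the Claim_ definition above) =====
theorem is_cobipartite_spec : Claim_equal_is_cobipartite := by
  intro n edges _ hpre
  exact pvMain n edges hpre
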